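-- pv_equiv track=rewrite | github.com/sepiabrown/scaffoldr | src/scaffoldr/core/formatters.py | format_dependency_text
-- ===== SOURCE A (Python) =====
-- from collections import defaultdict
-- from typing import Any
--
-- def format_dependency_text(dep_graph: dict[str, Any]) -> str:
--     """Format package-level deps as compressed text.
--
--     Uses full names (myapp.cli, mylib.cli) to avoid ambiguity.
--     Groups by root package automatically.
--     """
--     lines = ["# Module Dependency Graph (package-level)", ""]
--     pkg_graph = dep_graph["package_level"]
--
--     # Group by root package for clarity
--     groups: dict[str, dict[str, list[str]]] = defaultdict(dict)
--     for src, dsts in sorted(pkg_graph.items()):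
--         root = src.split(".")[0]
--         groups[root][src] = sorted(dsts)
--
--     for root, pkgs in sorted(groups.items()):
--         lines.append(f"## {root}")
--         for src, dsts in pkgs.items():
--             lines.append(f"  {src} -> {', '.join(dsts)}")
--
--     return "\n".join(lines)
-- ===== SOURCE B (Python) =====
-- def format_dependency_text(dep_graph: dict) -> str:
--     """Format package-level deps as compressed text (grouped by root package)."""
--     pkg_graph = dep_graph["package_level"]
--     items = sorted(pkg_graph.items())
--     roots = sorted({src.split(".")[0] for src, _ in items})
--     lines = ["# Module Dependency Graph (package-level)", ""]
--     for root in roots: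
--         lines.append(f"## {root}")
--         lines.extend(
--             f"  {src} -> {', '.join(sorted(dsts))}"
--             for src, dsts in items
--             if src.split(".")[0] == root
--         )
--     return "\n".join(lines)
-- ===== Notes on version B (the rewrite author's own statement) =====
-- stated objective: simpler
-- what changed: B replaces A's nested defaultdict bucketing (build dict-of-dicts, sort the outer dict, iterate the inner dicts) with a direct emission: sort the items once, compute the sorted set of root names, and for each root emit its header plus the lines filtered from the sorted items, sorting each dst list at emission.
import Mathlib
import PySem

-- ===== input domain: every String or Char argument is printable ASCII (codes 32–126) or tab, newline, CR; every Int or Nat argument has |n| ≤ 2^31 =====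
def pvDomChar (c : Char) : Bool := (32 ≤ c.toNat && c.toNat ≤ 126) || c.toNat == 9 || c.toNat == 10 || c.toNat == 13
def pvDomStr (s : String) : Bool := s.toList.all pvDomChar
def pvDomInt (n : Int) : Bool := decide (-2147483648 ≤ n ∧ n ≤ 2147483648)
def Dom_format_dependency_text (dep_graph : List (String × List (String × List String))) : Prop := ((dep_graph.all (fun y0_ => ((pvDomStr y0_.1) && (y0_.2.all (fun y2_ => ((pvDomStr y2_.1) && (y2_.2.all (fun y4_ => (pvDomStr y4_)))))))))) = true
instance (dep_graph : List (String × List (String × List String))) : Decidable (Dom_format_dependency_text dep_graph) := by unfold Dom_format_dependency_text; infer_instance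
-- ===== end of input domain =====

-- B replaces A's nested-defaultdict bucketing with sort-once + per-root filtered emission (objective: simpler).

-- src.split(".")[0]  (split? is some for the nonempty separator "." and never empty, so [0] is exact)
def pvRoot (s : String) : String := (((PySem.Str.split? s ".").getD []).headD "")

-- ===== PORT A =====
def format_dependency_text (dep_graph : List (String × List (String × List String))) : String :=
  let lines : List String := ["# Module Dependency Graph (package-level)", ""]
  -- dep_graph["package_level"]: KeyError when the key is absent — excluded by Pre_
  let pkg_graph : List (String × List String) :=
    ((PySem.Dict.mk dep_graph).get? "package_level").getD []
  -- sorted(pkg_graph.items()): under Pre_ the keys are distinct, so sorting by the key is exact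
  let groups : PySem.Dict String (PySem.Dict String (List String)) :=
    (PySem.List.sorted pkg_graph (fun p => p.1) false).foldl
      (fun g p => g.modify (pvRoot p.1) PySem.Dict.empty
        (fun inner => inner.insert p.1 (PySem.List.sorted p.2 (fun d => d) false)))
      PySem.Dict.empty
  -- sorted(groups.items()): group keys are distinct, so sorting by the key is exact
  let lines2 := (PySem.List.sorted groups.items (fun q => q.1) false).foldl
      (fun acc q =>
        q.2.items.foldl
          (fun acc2 r => acc2 ++ ["  " ++ r.1 ++ " -> " ++ PySem.Str.join ", " r.2])
          (acc ++ ["## " ++ q.1]))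
      lines
  PySem.Str.join "\n" lines2

-- ===== PORT B =====
def format_dependency_text_alt (dep_graph : List (String × List (String × List String))) : String :=
  let pkg_graph : List (String × List String) :=
    ((PySem.Dict.mk dep_graph).get? "package_level").getD []
  let items := PySem.List.sorted pkg_graph (fun p => p.1) false
  let roots := PySem.List.sorted (PySem.Set.ofList (items.map (fun p => pvRoot p.1)))
      (fun x => x) false
  let lines := roots.foldl
      (fun acc root =>
        (acc ++ ["## " ++ root]) ++
          (items.filter (fun p => pvRoot p.1 == root)).map
            (fun p => "  " ++ p.1 ++ " -> " ++
              PySem.Str.join ", " (PySem.List.sorted p.2 (fun d => d) false)))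
      ["# Module Dependency Graph (package-level)", ""]
  PySem.Str.join "\n" lines

-- ===== PRECONDITION & SPEC =====
-- Pre_ excludes inputs where A raises KeyError (no "package_level" key) and association lists whose
-- inner "package_level" dict carries duplicate source keys, which cannot arise from a Python dict.
def Pre_format_dependency_text (dep_graph : List (String × List (String × List String))) : Prop :=
  (PySem.Dict.mk dep_graph).contains "package_level" = true ∧
  (((((PySem.Dict.mk dep_graph).get? "package_level").getD []).map Prod.fst).Nodup)
instance (dep_graph : List (String × List (String × List String))) : Decidable (Pre_format_dependency_text dep_graph) := by unfold Pre_format_dependency_text; infer_instance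

def pvWitness_format_dependency_text : (List (String × List (String × List String))) :=
  [("package_level", [("myapp.cli", ["os", "json"]), ("mylib", [])])]

def Spec_format_dependency_text (dep_graph : List (String × List (String × List String))) (out : String) : Prop := out = format_dependency_text_alt dep_graph
instance (dep_graph : List (String × List (String × List String))) (out : String) : Decidable (Spec_format_dependency_text dep_graph out) := by unfold Spec_format_dependency_text; infer_instance

-- ===== CLAIM (what is proved, stated in full; the proofs are below) =====
def Claim_equal_format_dependency_text : Prop := ∀ (dep_graph : List (String × List (String × List String))), Dom_format_dependency_text dep_graph → Pre_format_dependency_text dep_graph → Spec_format_dependency_text dep_graph (format_dependency_text dep_graph)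

-- ===== LEMMAS AND PROOFS =====

-- A's bucketing fold, looked up at one root, is an insert fold over the root-filtered items.
theorem pv_getD_bucket (v : (String × List String) → List String)
    (l : List (String × List String))
    (d : PySem.Dict String (PySem.Dict String (List String))) (root : String) :
    (l.foldl (fun g p => g.modify (pvRoot p.1) PySem.Dict.empty
        (fun inner => inner.insert p.1 (v p))) d).getD root PySem.Dict.empty
    = (l.filter (fun p => pvRoot p.1 == root)).foldl
        (fun inn p => inn.insert p.1 (v p)) (d.getD root PySem.Dict.empty) := by
  induction l generalizing d with
  | nil => rfl
  | cons p t ih =>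
      simp only [List.foldl_cons, List.filter_cons]
      by_cases h : pvRoot p.1 = root
      · simp [h, ih]
      · simp [h, ih, PySem.Dict.getD_modify, Ne.symm h]

-- The line lists agree: A's sorted dict-of-dicts traversal equals B's per-root filtered emission.
theorem pv_main (pkg : List (String × List String)) (hnd : (pkg.map Prod.fst).Nodup) :
    (PySem.List.sorted
          ((PySem.List.sorted pkg (fun p => p.1) false).foldl
            (fun g p => g.modify (pvRoot p.1) PySem.Dict.empty
              (fun inner => inner.insert p.1 (PySem.List.sorted p.2 (fun d => d) false)))
            PySem.Dict.empty).items (fun q => q.1) false).foldl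
        (fun acc q =>
          q.2.items.foldl
            (fun acc2 r => acc2 ++ ["  " ++ r.1 ++ " -> " ++ PySem.Str.join ", " r.2])
            (acc ++ ["## " ++ q.1]))
        ["# Module Dependency Graph (package-level)", ""]
    = (PySem.List.sorted
          (PySem.Set.ofList ((PySem.List.sorted pkg (fun p => p.1) false).map (fun p => pvRoot p.1)))
          (fun x => x) false).foldl
        (fun acc root =>
          (acc ++ ["## " ++ root]) ++
            ((PySem.List.sorted pkg (fun p => p.1) false).filter (fun p => pvRoot p.1 == root)).map
              (fun p => "  " ++ p.1 ++ " -> " ++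
                PySem.Str.join ", " (PySem.List.sorted p.2 (fun d => d) false)))
        ["# Module Dependency Graph (package-level)", ""] := by
  set items := PySem.List.sorted pkg (fun p => p.1) false with hitems
  have hk : (items.map Prod.fst).Nodup :=
    (((PySem.List.sorted_perm pkg (fun p => p.1) false).map Prod.fst).nodup_iff).mpr hnd
  set v : (String × List String) → List String :=
    fun p => PySem.List.sorted p.2 (fun d => d) false with hv
  set G := items.foldl
      (fun g p => g.modify (pvRoot p.1) PySem.Dict.empty
        (fun inner => inner.insert p.1 (v p))) PySem.Dict.empty with hG
  have hkeys : G.keys = PySem.Set.ofList (items.map (fun p => pvRoot p.1)) := by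
    rw [hG, PySem.Dict.keys_foldl_modify_key items (fun p => pvRoot p.1) PySem.Dict.empty
      (fun g p inner => inner.insert p.1 (v p)) PySem.Dict.empty]
    simp [PySem.Dict.keys_empty, PySem.Set.update_nil_left]
  have hGnd : G.keys.Nodup := by
    rw [hG]
    exact PySem.Dict.nodup_keys_foldl_modify_key items (fun p => pvRoot p.1) PySem.Dict.empty
      (fun g p inner => inner.insert p.1 (v p)) PySem.Dict.empty PySem.Dict.nodup_keys_empty
  set roots := PySem.List.sorted (PySem.Set.ofList (items.map (fun p => pvRoot p.1)))
      (fun x => x) false with hroots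
  have hr_perm : roots.Perm (PySem.Set.ofList (items.map (fun p => pvRoot p.1))) :=
    PySem.List.sorted_perm _ _ _
  have hr_nd : roots.Nodup := hr_perm.nodup_iff.mpr (PySem.Set.nodup_ofList _)
  have hr_le : roots.Pairwise (· ≤ ·) := PySem.List.sorted_pairwise _ _
  have hr_lt : roots.Pairwise (· < ·) :=
    (hr_le.and hr_nd).imp (fun h => lt_of_le_of_ne h.1 h.2)
  have hsorted : PySem.List.sorted G.items (fun q => q.1) false
      = roots.map (fun k => (k, G.getD k PySem.Dict.empty)) := by
    apply PySem.List.sorted_eq_of_perm_of_pairwise_lt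
    · rw [PySem.Dict.items_eq_map_keys G hGnd PySem.Dict.empty, hkeys]
      exact hr_perm.map _
    · exact (List.pairwise_map).mpr hr_lt
  have hinner : ∀ root : String, (G.getD root PySem.Dict.empty).items
      = (items.filter (fun p => pvRoot p.1 == root)).map (fun p => (p.1, v p)) := by
    intro root
    rw [hG, pv_getD_bucket]
    rw [PySem.Dict.getD_empty]
    rw [PySem.Dict.items_foldl_insert_fresh _ (fun p => p.1) v PySem.Dict.empty
      (fun a _ => PySem.Dict.contains_empty _)
      (hk.sublist (List.Sublist.map Prod.fst (List.filter_sublist (l := items))))]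
    rfl
  rw [hsorted, List.foldl_map]
  congr 1
  funext acc root
  rw [hinner root, PySem.List.foldl_append_singleton_eq_map, List.map_map]
  rfl

-- ===== VERDICT (by name: the statement is the Claim_ definition above) =====
theorem format_dependency_text_spec : Claim_equal_format_dependency_text := by
  intro dep _hdom hpre
  unfold Spec_format_dependency_text format_dependency_text format_dependency_text_alt
  exact congrArg (PySem.Str.join "\n") (pv_main _ hpre.2)
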